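-- pv_equiv track=rewrite | github.com/benquick123/code-profiling | code/batch-2/vse-naloge-brez-testov/DN12-M-016.py | mozna_pot
-- ===== SOURCE A (Python) =====
-- def mozna_pot(pot, zemljevid):
--     #skillz
--     ne_ponovi = True
--     st = 0
--     for i in pot:
--         if st != 0 and pot[st] == pot[st-1]:
--             ne_ponovi = False
--
--         st += 1
--
--     vmes_ni_kon_povezav = True
--     st = 0
--     for krozisce in pot:
--         if st != 0 and st != len(pot) - 1 and len(zemljevid.get(krozisce)) == 1:
--             vmes_ni_kon_povezav = False
--         st += 1
--
--     mozno_prevoziti = True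
--     st = 0
--     for i in range(len(pot)-1):
--         if i != len(pot) - 1 and pot[i+1] not in zemljevid.get(pot[i]):
--             mozno_prevoziti = False
--
--     if (len(zemljevid.get(pot[0])) == 1) and (len(zemljevid.get(pot[-1])) == 1) and ne_ponovi == True and vmes_ni_kon_povezav == True and mozno_prevoziti == True:
--         return True
--
--     else:
--         return False
-- ===== SOURCE B (Python) =====
-- def mozna_pot(pot, zemljevid):
--     # Single recursive walk over suffixes of pot: checks each edge (distinct and
--     # connected), each interior node's degree != 1, and finally the last node's
--     # degree == 1; the first node's degree == 1 is checked before starting.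
--     def walk(rest):
--         if len(rest) == 1:
--             return len(zemljevid.get(rest[0])) == 1
--         a, b = rest[0], rest[1]
--         if a == b or b not in zemljevid.get(a):
--             return False
--         if len(rest) > 2 and len(zemljevid.get(b)) == 1:
--             return False
--         return walk(rest[1:])
--     return len(zemljevid.get(pot[0])) == 1 and walk(pot)
-- ===== Notes on version B (the rewrite author's own statement) =====
-- stated objective: alternative
-- what changed: A's three staged flag-and-counter loops over the whole path are replaced by one recursive walk that consumes suffixes of pot, deciding edge validity (distinctness + connectivity), interior degree and the final node's degree in a single descent, with only the first node's degree checked up front.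
import Mathlib
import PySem

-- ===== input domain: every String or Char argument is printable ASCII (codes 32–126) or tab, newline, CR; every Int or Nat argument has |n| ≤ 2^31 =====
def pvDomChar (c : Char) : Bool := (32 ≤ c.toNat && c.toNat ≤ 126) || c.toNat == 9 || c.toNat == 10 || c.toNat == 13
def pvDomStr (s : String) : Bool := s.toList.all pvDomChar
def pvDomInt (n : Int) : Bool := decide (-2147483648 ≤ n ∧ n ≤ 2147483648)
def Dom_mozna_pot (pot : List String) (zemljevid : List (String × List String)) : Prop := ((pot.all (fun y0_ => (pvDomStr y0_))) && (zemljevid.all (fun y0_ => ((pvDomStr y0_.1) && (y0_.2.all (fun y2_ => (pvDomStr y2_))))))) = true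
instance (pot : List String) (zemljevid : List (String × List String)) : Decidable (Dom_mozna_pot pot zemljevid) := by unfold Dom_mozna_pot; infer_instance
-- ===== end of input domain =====

-- B replaces A's three staged flag-and-counter loops with one recursive walk over suffixes of
-- pot that checks edges, interior degrees and the last node's degree in a single descent;
-- objective: alternative decomposition, same cost. Return values only; nothing is mutated.

-- ===== PORT A =====
-- A's three loops each keep a flag and a manual counter `st`; ported as foldl over (flag, st).
-- `zemljevid.get(k)` is (Dict.mk zemljevid).get?. Where Python would raise — len(None)/`in None`
-- (TypeError) and pot[0]/pot[-1] on empty pot (IndexError) — Pre_ excludes the input, so the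
-- `.getD` defaults below are never the value the claim is about.
def mozna_pot (pot : List String) (zemljevid : List (String × List String)) : Bool :=
  let get := fun k => PySem.Dict.get? (PySem.Dict.mk zemljevid) k
  let ne_ponovi := (pot.foldl (fun (s : Bool × Int) _ =>
      (if s.2 != 0 && (PySem.List.pyGetD pot s.2 "" == PySem.List.pyGetD pot (s.2 - 1) "") then false else s.1,
       s.2 + 1)) (true, 0)).1
  let vmes_ni_kon_povezav := (pot.foldl (fun (s : Bool × Int) krozisce =>
      (if s.2 != 0 && s.2 != PySem.List.len pot - 1 && ((get krozisce).getD []).length == 1 then false else s.1,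
       s.2 + 1)) (true, 0)).1
  let mozno_prevoziti := (PySem.List.pyRange 0 (PySem.List.len pot - 1) 1).foldl (fun m i =>
      if i != PySem.List.len pot - 1 && !(((get (PySem.List.pyGetD pot i "")).getD []).contains (PySem.List.pyGetD pot (i + 1) "")) then false else m) true
  if (((get (PySem.List.pyGetD pot 0 "")).getD []).length == 1)
      && (((get (PySem.List.pyGetD pot (-1) "")).getD []).length == 1)
      && (ne_ponovi == true) && (vmes_ni_kon_povezav == true) && (mozno_prevoziti == true) then
    true
  else
    false

-- ===== PORT B =====
-- B's inner `walk(rest)`: structural recursion on the suffix. The `[] => false` case is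
-- totality filler only (Python's walk is never called on an empty list under Pre_).
def mozna_pot_walk (Z : PySem.Dict String (List String)) : List String → Bool
  | [] => false
  | [x] => ((Z.get? x).getD []).length == 1
  | a :: b :: rest =>
      if a == b || !((Z.get? a).getD []).contains b then false
      else if rest ≠ [] && ((Z.get? b).getD []).length == 1 then false
      else mozna_pot_walk Z (b :: rest)

def mozna_pot_alt (pot : List String) (zemljevid : List (String × List String)) : Bool :=
  (((PySem.Dict.get? (PySem.Dict.mk zemljevid) (PySem.List.pyGetD pot 0 "")).getD []).length == 1)
    && mozna_pot_walk (PySem.Dict.mk zemljevid) pot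

-- ===== PRECONDITION & SPEC =====
-- Pre_ excludes exactly the inputs on which Python A raises: empty pot (IndexError on pot[0]),
-- a node other than the last missing from zemljevid (len(None)/`in None` TypeError), and a
-- missing last node when the final condition's short-circuit on pot[0]'s degree does not stop
-- evaluation before len(zemljevid.get(pot[-1])).
def Pre_mozna_pot (pot : List String) (zemljevid : List (String × List String)) : Prop :=
  pot ≠ [] ∧
  (∀ x ∈ pot.dropLast, (PySem.Dict.mk zemljevid).contains x = true) ∧
  (PySem.Dict.mk zemljevid).contains (pot.getD 0 "") = true ∧
  ((PySem.Dict.mk zemljevid).contains (pot.getLast?.getD "") = true ∨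
    ((PySem.Dict.get? (PySem.Dict.mk zemljevid) (pot.getD 0 "")).getD []).length ≠ 1)
instance (pot : List String) (zemljevid : List (String × List String)) : Decidable (Pre_mozna_pot pot zemljevid) := by unfold Pre_mozna_pot; infer_instance

def pvWitness_mozna_pot : List String × (List (String × List String)) :=
  (["a", "b", "c"], [("a", ["b"]), ("b", ["a", "c"]), ("c", ["b"])])

def Spec_mozna_pot (pot : List String) (zemljevid : List (String × List String)) (out : Bool) : Prop := out = mozna_pot_alt pot zemljevid
instance (pot : List String) (zemljevid : List (String × List String)) (out : Bool) : Decidable (Spec_mozna_pot pot zemljevid out) := by unfold Spec_mozna_pot; infer_instance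

-- ===== CLAIM (what is proved, stated in full; the proofs are below) =====
def Claim_equal_mozna_pot : Prop := ∀ (pot : List String) (zemljevid : List (String × List String)), Dom_mozna_pot pot zemljevid → Pre_mozna_pot pot zemljevid → Spec_mozna_pot pot zemljevid (mozna_pot pot zemljevid)

-- ===== LEMMAS AND PROOFS =====

-- A's flag-and-counter loop shape: the flag survives iff the test fails at every (index, element).
theorem flag_fold {α : Type} (l : List α) (g : Int → α → Bool) (b : Bool) (k : Int) :
    l.foldl (fun (s : Bool × Int) x => (if g s.2 x then false else s.1, s.2 + 1)) (b, k)
      = (b && (PySem.List.enumerate l k).all (fun p => !g p.1 p.2), k + l.length) := by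
  induction l generalizing b k with
  | nil => simp [PySem.List.enumerate_nil]
  | cons x xs ih =>
    simp only [List.foldl_cons, ih, PySem.List.enumerate_cons, List.all_cons, List.length_cons]
    rw [Prod.mk.injEq]
    constructor
    · cases hg : g k x <;> simp
    · push_cast; ring

-- A's third loop: a plain flag over a range.
theorem flag_fold_simple (l : List Int) (g : Int → Bool) (b : Bool) :
    l.foldl (fun m i => if g i then false else m) b = (b && l.all (fun i => !g i)) := by
  induction l generalizing b with
  | nil => simp
  | cons x xs ih =>
    simp only [List.foldl_cons, List.all_cons]
    rw [ih]
    cases g x <;> cases b <;> simp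

-- A's interior-degree loop (skipping st = 0 and st = len-1) equals the check over the interior.
theorem interior_lemma (pot : List String) (Z : PySem.Dict String (List String)) :
    (PySem.List.enumerate pot 0).all (fun p => !(p.1 != 0 && p.1 != (pot.length : Int) - 1 && (((Z.get? p.2).getD []).length == 1)))
    = ((pot.drop 1).take (pot.length - 2)).all (fun k => ((Z.get? k).getD []).length != 1) := by
  rw [Bool.eq_iff_iff]
  simp only [List.all_eq_true, List.mem_iff_getElem]
  constructor
  · intro H x hx
    simp at hx ⊢
    obtain ⟨i, ⟨h2, h1⟩, rfl⟩ := hx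
    have := H ((PySem.List.enumerate pot 0)[i+1]'(by rw [PySem.List.length_enumerate]; omega))
      ⟨i+1, by rw [PySem.List.length_enumerate]; omega, rfl⟩
    rw [PySem.List.getElem_enumerate] at this
    simp at this
    rcases this with (h0 | hn) | hlen
    · omega
    · omega
    · exact hlen
  · intro H p hp
    simp at hp ⊢
    obtain ⟨i, hi, rfl⟩ := hp
    rw [PySem.List.getElem_enumerate]
    simp
    by_cases h0 : i = 0
    · exact Or.inl (Or.inl (by omega))
    by_cases hl : i = pot.length - 1
    · exact Or.inl (Or.inr (by omega))
    · right
      have hh := H pot[i] ⟨i - 1, by simp; omega, by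
        rw [List.getElem_take, List.getElem_drop]; congr 1; omega⟩
      simpa using hh

-- A's duplicate loop together with its connectivity loop equals one pass over the
-- consecutive pairs zip pot pot.tail.
theorem pairs_lemma (pot : List String) (Z : PySem.Dict String (List String)) :
    ((PySem.List.enumerate pot 0).all (fun p => !(p.1 != 0 && (PySem.List.pyGetD pot p.1 "" == PySem.List.pyGetD pot (p.1 - 1) ""))) &&
     (PySem.List.pyRange 0 ((pot.length : Int) - 1) 1).all (fun i => !(i != (pot.length : Int) - 1 && !((Z.get? (PySem.List.pyGetD pot i "")).getD []).contains (PySem.List.pyGetD pot (i + 1) ""))))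
    = !((pot.zip pot.tail).any (fun ab => ab.1 == ab.2 || !((Z.get? ab.1).getD []).contains ab.2)) := by
  have hget : ∀ (k : Nat) (h : k < pot.length), PySem.List.pyGetD pot (k : Int) "" = pot[k] := by
    intro k h
    rw [PySem.List.pyGetD_natCast, List.getD_eq_getElem?_getD, List.getElem?_eq_getElem h]
    rfl
  rw [Bool.eq_iff_iff]
  simp only [Bool.and_eq_true, List.all_eq_true, Bool.not_eq_eq_eq_not, Bool.not_true,
    List.any_eq_false, List.mem_iff_getElem]
  constructor
  · rintro ⟨H1, H2⟩ ab hab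
    simp at hab ⊢
    obtain ⟨i, hi, rfl⟩ := hab
    constructor
    · have h1 := H1 ((PySem.List.enumerate pot 0)[i+1]'(by rw [PySem.List.length_enumerate]; omega))
        ⟨i+1, by rw [PySem.List.length_enumerate]; omega, rfl⟩
      rw [PySem.List.getElem_enumerate,
        show ((0 : Int) + ↑(i + 1)) = ((i + 1 : Nat) : Int) from by push_cast; ring] at h1
      rw [show ((i + 1 : Nat) : Int) - 1 = ((i : Nat) : Int) from by push_cast; ring,
        hget (i+1) (by omega), hget i (by omega)] at h1
      simp only [Bool.and_eq_false_iff, bne_eq_false_iff_eq, beq_eq_false_iff_ne] at h1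
      rcases h1 with h1 | h1
      · exfalso; omega
      · intro he
        simp at he
        exact h1 he.symm
    · have h2 := H2 ((i : Int))
        ⟨i, by rw [PySem.List.length_pyRange_one]; omega, by rw [PySem.List.getElem_pyRange_one]; ring⟩
      rw [show ((i : Nat) : Int) + 1 = ((i + 1 : Nat) : Int) from by push_cast; ring,
        hget (i+1) (by omega), hget i (by omega)] at h2
      simp only [Bool.and_eq_false_iff, bne_eq_false_iff_eq, Bool.not_eq_false'] at h2
      rcases h2 with h2 | h2
      · exfalso; omega
      · simpa using h2
  · intro H
    constructor
    · intro p hp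
      simp at hp
      obtain ⟨i, hi, rfl⟩ := hp
      rw [PySem.List.getElem_enumerate]
      simp
      intro hne
      have hi1 : 1 ≤ i := by omega
      have hz := H ((pot.zip pot.tail)[i-1]'(by simp [List.length_tail]; omega))
        ⟨i-1, by simp [List.length_tail]; omega, rfl⟩
      rw [List.getElem_zip, List.getElem_tail] at hz
      simp at hz
      rw [show ((i : Nat) : Int) - 1 = ((i - 1 : Nat) : Int) from by push_cast [hi1]; ring,
        hget (i-1) (by omega)]
      have hii : i - 1 + 1 = i := by omega
      simp only [hii] at hz
      have hgoal : pot[i]?.getD "" = pot[i] := by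
        rw [List.getElem?_eq_getElem hi]; rfl
      rw [hgoal]
      exact fun he => hz.1 (by rw [he])
    · intro j hj
      simp at hj ⊢
      obtain ⟨i, hi, rfl⟩ := hj
      intro _
      have hz := H ((pot.zip pot.tail)[i]'(by simp [List.length_tail]; omega))
        ⟨i, by simp [List.length_tail]; omega, rfl⟩
      rw [List.getElem_zip, List.getElem_tail] at hz
      simp at hz
      rw [show ((i : Nat) : Int) + 1 = ((i + 1 : Nat) : Int) from by push_cast; ring,
        hget (i+1) (by omega), hget i (by omega)]
      exact hz.2

-- B's walk, characterised: pairs pass + interior degrees + last-node degree.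
theorem walk_spec (Z : PySem.Dict String (List String)) (a : String) (rest : List String) :
    mozna_pot_walk Z (a :: rest)
      = (!(((a :: rest).zip rest).any (fun ab => ab.1 == ab.2 || !((Z.get? ab.1).getD []).contains ab.2))
         && rest.dropLast.all (fun k => ((Z.get? k).getD []).length != 1)
         && (((Z.get? ((a :: rest).getLast (by simp))).getD []).length == 1)) := by
  induction rest generalizing a with
  | nil => simp [mozna_pot_walk]
  | cons b rs ih =>
    rw [mozna_pot_walk, ih b]
    cases hab : a == b with
    | true => simp [hab]
    | false =>
      cases hconn : ((Z.get? b).getD []).contains b <;>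
      cases hconn2 : ((Z.get? a).getD []).contains b
      all_goals cases rs with
      | nil => simp_all [List.getLast_cons]
      | cons c rs' =>
        cases hdeg : ((Z.get? b).getD []).length == 1 <;>
          simp_all [List.getLast_cons, List.zip_cons_cons] <;>
          (try (rw [beq_eq_false_iff_ne.mpr hab, bne_iff_ne.mpr hdeg]; simp))

theorem slice_eq_dropLast (b : String) (rs : List String) :
    ((b :: rs).drop 1).take ((b :: rs).length - 2) = rs.dropLast := by
  simp [List.dropLast_eq_take]

theorem mozna_pot_eq (pot : List String) (zemljevid : List (String × List String))
    (hne : pot ≠ []) :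
    mozna_pot pot zemljevid = mozna_pot_alt pot zemljevid := by
  obtain ⟨a, rest, rfl⟩ := List.exists_cons_of_ne_nil hne
  simp only [mozna_pot, mozna_pot_alt]
  rw [flag_fold (a :: rest) (fun j _ => j != 0 && (PySem.List.pyGetD (a :: rest) j "" == PySem.List.pyGetD (a :: rest) (j - 1) "")) true 0,
      flag_fold (a :: rest) (fun j x => j != 0 && j != PySem.List.len (a :: rest) - 1 && ((PySem.Dict.get? (PySem.Dict.mk zemljevid) x).getD []).length == 1) true 0,
      flag_fold_simple _ (fun i => i != PySem.List.len (a :: rest) - 1 && !(((PySem.Dict.get? (PySem.Dict.mk zemljevid) (PySem.List.pyGetD (a :: rest) i "")).getD []).contains (PySem.List.pyGetD (a :: rest) (i + 1) ""))) true]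
  simp only [PySem.List.len_eq, Bool.true_and, beq_true]
  rw [walk_spec]
  have h0 : PySem.List.pyGetD (a :: rest) 0 "" = a := by
    simp [PySem.List.pyGetD_zero_cons]
  have hlast : PySem.List.pyGetD (a :: rest) (-1) "" = (a :: rest).getLast (List.cons_ne_nil a rest) := by
    exact PySem.List.pyGetD_neg_one (a :: rest) "" (List.cons_ne_nil a rest)
  rw [h0, hlast]
  have hpair := pairs_lemma (a :: rest) (PySem.Dict.mk zemljevid)
  have hint := interior_lemma (a :: rest) (PySem.Dict.mk zemljevid)
  rw [List.tail_cons] at hpair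
  rw [slice_eq_dropLast] at hint
  rw [hint, ← Bool.not_not ((((a :: rest).zip rest).any (fun ab => ab.1 == ab.2 || !((PySem.Dict.get? (PySem.Dict.mk zemljevid) ab.1).getD []).contains ab.2))), ← hpair]
  cases hx : (((PySem.Dict.mk zemljevid).get? a).getD []).length == 1 <;>
  cases hy : (((PySem.Dict.mk zemljevid).get? ((a :: rest).getLast (by simp))).getD []).length == 1 <;>
  cases hf1 : ((PySem.List.enumerate (a :: rest) 0).all fun p => !(p.1 != 0 && PySem.List.pyGetD (a :: rest) p.1 "" == PySem.List.pyGetD (a :: rest) (p.1 - 1) "")) <;>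
  cases hf2 : (rest.dropLast.all fun k => (((PySem.Dict.mk zemljevid).get? k).getD []).length != 1) <;>
  cases hf3 : ((PySem.List.pyRange 0 (((a :: rest).length : Int) - 1) 1).all fun i => !(i != ((a :: rest).length : Int) - 1 && !(((PySem.Dict.mk zemljevid).get? (PySem.List.pyGetD (a :: rest) i "")).getD []).contains (PySem.List.pyGetD (a :: rest) (i + 1) ""))) <;>
  simp_all

-- ===== VERDICT (by name: the statement is the Claim_ definition above) =====
theorem mozna_pot_spec : Claim_equal_mozna_pot := by
  intro pot zemljevid _ hpre
  exact mozna_pot_eq pot zemljevid hpre.1
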